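-- pv_equiv track=rewrite | github.com/cyxfff/icache_test | tools/render_combo_linearity_md.py | choose_metrics
-- ===== SOURCE A (Python) =====
-- from typing import Dict, Iterable, List, Sequence
--
-- RAW_COUNT_METRICS = [
--     "cpu-cycles:u",
--     "instructions:u",
--     "br_retired:u",
--     "br_mis_pred:u",
--     "l1i_cache:u",
--     "l1i_cache_refill:u",
--     "l1i_tlb:u",
--     "l1i_tlb_refill:u",
--     "l2i_cache:u",
--     "l2i_cache_refill:u",
--     "l2i_tlb:u",
--     "l2i_tlb_refill:u",
--     "l1d_cache:u",
--     "l1d_cache_refill:u",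
--     "l1d_tlb:u",
--     "l1d_tlb_refill:u",
--     "l2d_cache:u",
--     "l2d_cache_refill:u",
--     "l2d_tlb:u",
--     "l2d_tlb_refill:u",
--     "ll_cache:u",
--     "ll_cache_miss:u",
-- ]
--
-- CORE_COUNT_METRICS = [
--     "instructions:u",
--     "cpu-cycles:u",
--     "br_retired:u",
--     "br_mis_pred:u",
--     "l1i_cache_refill:u",
--     "l1i_tlb_refill:u",
--     "l1d_cache_refill:u",
--     "l1d_tlb_refill:u",
--     "l2d_cache_refill:u",
--     "ll_cache_miss:u",
-- ]
--
-- def choose_metrics(rows: Sequence[Dict[str, str]], metric_set: str, metrics_override: str) -> List[str]: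
--     if metrics_override.strip():
--         candidates = [metric.strip() for metric in metrics_override.split(",") if metric.strip()]
--     elif metric_set == "core":
--         candidates = CORE_COUNT_METRICS
--     else:
--         candidates = RAW_COUNT_METRICS
--
--     return [
--         metric
--         for metric in candidates
--         if any(row.get(metric) not in ("", None) for row in rows)
--     ]
-- ===== SOURCE B (Python) =====
-- from typing import Dict, List, Sequence
--
-- RAW_COUNT_METRICS = [
--     "cpu-cycles:u",
--     "instructions:u",
--     "br_retired:u",
--     "br_mis_pred:u",
--     "l1i_cache:u",
--     "l1i_cache_refill:u",
--     "l1i_tlb:u",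
--     "l1i_tlb_refill:u",
--     "l2i_cache:u",
--     "l2i_cache_refill:u",
--     "l2i_tlb:u",
--     "l2i_tlb_refill:u",
--     "l1d_cache:u",
--     "l1d_cache_refill:u",
--     "l1d_tlb:u",
--     "l1d_tlb_refill:u",
--     "l2d_cache:u",
--     "l2d_cache_refill:u",
--     "l2d_tlb:u",
--     "l2d_tlb_refill:u",
--     "ll_cache:u",
--     "ll_cache_miss:u",
-- ]
--
-- CORE_COUNT_METRICS = [
--     "instructions:u",
--     "cpu-cycles:u",
--     "br_retired:u",
--     "br_mis_pred:u",
--     "l1i_cache_refill:u",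
--     "l1i_tlb_refill:u",
--     "l1d_cache_refill:u",
--     "l1d_tlb_refill:u",
--     "l2d_cache_refill:u",
--     "ll_cache_miss:u",
-- ]
--
-- def choose_metrics(rows: Sequence[Dict[str, str]], metric_set: str, metrics_override: str) -> List[str]:
--     # candidate selection: explicit accumulator loop instead of A's comprehension
--     if metrics_override.strip():
--         candidates = []
--         for token in metrics_override.split(","):
--             if token.strip():
--                 candidates.append(token.strip())
--     elif metric_set == "core":
--         candidates = CORE_COUNT_METRICS
--     else:
--         candidates = RAW_COUNT_METRICS
--
--     # one index-building pass over the rows: every key carrying a present value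
--     present = set()
--     for row in rows:
--         for key, value in row.items():
--             if value not in ("", None):
--                 present.add(key)
--
--     # membership filter over the candidates, built with an explicit loop
--     selected = []
--     for metric in candidates:
--         if metric in present:
--             selected.append(metric)
--     return selected
-- ===== Notes on version B (the rewrite author's own statement) =====
-- stated objective: alternative
-- what changed: Replaces the per-candidate any(...) rescan of all rows with one index-building pass over the rows (a set of keys that carry a present value) followed by an accumulator loop filtering the candidates by membership; the candidate list is built by an explicit loop instead of a comprehension.
import Mathlib
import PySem

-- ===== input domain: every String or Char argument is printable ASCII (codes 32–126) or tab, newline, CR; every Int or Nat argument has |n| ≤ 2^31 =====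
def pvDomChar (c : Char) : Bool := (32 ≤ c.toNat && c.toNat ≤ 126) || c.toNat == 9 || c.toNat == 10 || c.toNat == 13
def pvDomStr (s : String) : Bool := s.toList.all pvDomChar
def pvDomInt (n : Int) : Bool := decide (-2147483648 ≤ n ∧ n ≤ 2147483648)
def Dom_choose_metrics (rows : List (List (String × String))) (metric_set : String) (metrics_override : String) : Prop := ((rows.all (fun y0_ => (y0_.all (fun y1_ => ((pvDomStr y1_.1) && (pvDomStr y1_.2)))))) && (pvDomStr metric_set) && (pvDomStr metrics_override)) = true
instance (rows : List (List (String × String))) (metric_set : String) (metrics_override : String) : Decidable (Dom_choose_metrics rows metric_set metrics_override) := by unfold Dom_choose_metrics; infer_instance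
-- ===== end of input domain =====

-- B replaces A's per-candidate rescan of all rows with one index-building pass over the rows
-- (a set of keys carrying a non-empty value) followed by an accumulator loop over the candidates.

-- ===== PORT A =====
def RAW_COUNT_METRICS : List String :=
  ["cpu-cycles:u", "instructions:u", "br_retired:u", "br_mis_pred:u",
   "l1i_cache:u", "l1i_cache_refill:u", "l1i_tlb:u", "l1i_tlb_refill:u",
   "l2i_cache:u", "l2i_cache_refill:u", "l2i_tlb:u", "l2i_tlb_refill:u",
   "l1d_cache:u", "l1d_cache_refill:u", "l1d_tlb:u", "l1d_tlb_refill:u",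
   "l2d_cache:u", "l2d_cache_refill:u", "l2d_tlb:u", "l2d_tlb_refill:u",
   "ll_cache:u", "ll_cache_miss:u"]

def CORE_COUNT_METRICS : List String :=
  ["instructions:u", "cpu-cycles:u", "br_retired:u", "br_mis_pred:u",
   "l1i_cache_refill:u", "l1i_tlb_refill:u", "l1d_cache_refill:u",
   "l1d_tlb_refill:u", "l2d_cache_refill:u", "ll_cache_miss:u"]

-- A, comprehension style: pick candidates, then keep those for which any row's
-- first-match lookup yields a value ≠ "" (row.get(metric) not in ("", None); values are strings)
def choose_metrics (rows : List (List (String × String))) (metric_set : String) (metrics_override : String) : List String :=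
  let candidates :=
    if PySem.Str.strip metrics_override ≠ "" then
      ((((PySem.Str.split? metrics_override ",").getD []).map PySem.Str.strip).filter (fun m => m ≠ ""))  -- split? is some here (sep ≠ ""); getD only totalizes
    else if metric_set = "core" then CORE_COUNT_METRICS
    else RAW_COUNT_METRICS
  candidates.filter (fun metric =>
    rows.any (fun row =>
      match (PySem.Dict.mk row).get? metric with
      | some v => v ≠ ""
      | none => false))

-- ===== PORT B =====
-- B's index: one pass over the rows, collecting every key with a non-empty value
def pvPresentKeys (rows : List (List (String × String))) : PySem.Set String :=
  rows.foldl (fun s row =>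
    row.foldl (fun s kv => if kv.2 ≠ "" then PySem.Set.add s kv.1 else s) s)
    PySem.Set.empty

-- B's candidate loop for a non-blank override: strip each token, append the non-empty ones
def pvOverrideCandidates (metrics_override : String) : List String :=
  ((PySem.Str.split? metrics_override ",").getD []).foldl
    (fun acc token =>
      if PySem.Str.strip token ≠ "" then acc ++ [PySem.Str.strip token] else acc) []

def choose_metrics_alt (rows : List (List (String × String))) (metric_set : String) (metrics_override : String) : List String :=
  let candidates :=
    if PySem.Str.strip metrics_override ≠ "" then pvOverrideCandidates metrics_override
    else if metric_set = "core" then CORE_COUNT_METRICS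
    else RAW_COUNT_METRICS
  let present := pvPresentKeys rows
  candidates.foldl
    (fun selected metric =>
      if PySem.Set.contains present metric then selected ++ [metric] else selected) []

-- ===== PRECONDITION & SPEC =====
-- Pre_ excludes rows whose association list repeats a key: such a list is not the image of
-- any Python dict (A's parameter type), and A (first-match lookup) and B (scan of all items)
-- may disagree on which of the duplicate values counts.
def Pre_choose_metrics (rows : List (List (String × String))) (metric_set : String) (metrics_override : String) : Prop :=
  ∀ row ∈ rows, (row.map Prod.fst).Nodup
instance (rows : List (List (String × String))) (metric_set : String) (metrics_override : String) : Decidable (Pre_choose_metrics rows metric_set metrics_override) := by unfold Pre_choose_metrics; infer_instance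

def pvWitness_choose_metrics : (List (List (String × String))) × String × String :=
  ([[("cpu-cycles:u", "12"), ("instructions:u", "")]], "core", "")

def Spec_choose_metrics (rows : List (List (String × String))) (metric_set : String) (metrics_override : String) (out : List String) : Prop := out = choose_metrics_alt rows metric_set metrics_override
instance (rows : List (List (String × String))) (metric_set : String) (metrics_override : String) (out : List String) : Decidable (Spec_choose_metrics rows metric_set metrics_override out) := by unfold Spec_choose_metrics; infer_instance

-- ===== CLAIM (what is proved, stated in full; the proofs are below) =====
def Claim_equal_choose_metrics : Prop := ∀ (rows : List (List (String × String))) (metric_set : String) (metrics_override : String), Dom_choose_metrics rows metric_set metrics_override → Pre_choose_metrics rows metric_set metrics_override → Spec_choose_metrics rows metric_set metrics_override (choose_metrics rows metric_set metrics_override)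

-- ===== LEMMAS AND PROOFS =====

-- B's override loop builds exactly A's comprehension value
theorem pvOverride_eq (ov : String) :
    pvOverrideCandidates ov
    = ((((PySem.Str.split? ov ",").getD []).map PySem.Str.strip).filter (fun m => m ≠ "")) := by
  unfold pvOverrideCandidates
  have hfun : ∀ (acc : List String) (t : String),
      (if PySem.Str.strip t ≠ "" then acc ++ [PySem.Str.strip t] else acc)
      = (if (decide (PySem.Str.strip t ≠ "")) = true then acc ++ [PySem.Str.strip t] else acc) := by
    intro acc t; by_cases h : PySem.Str.strip t = "" <;> simp [h]
  simp only [hfun]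
  rw [PySem.List.foldl_append_if (fun t => decide (PySem.Str.strip t ≠ "")) PySem.Str.strip,
      List.nil_append, List.filter_map]
  rfl

-- per-row: A's first-match lookup test equals B's scan of all items, given nodup keys
theorem pvRow_eq (row : List (String × String)) (m : String)
    (h : (row.map Prod.fst).Nodup) :
    (match (PySem.Dict.mk row).get? m with
     | some v => decide (v ≠ "")
     | none => false)
    = row.any (fun kv => kv.1 == m && kv.2 != "") := by
  induction row with
  | nil => simp [PySem.Dict.get?]
  | cons kv rest ih =>
    simp only [List.map_cons, List.nodup_cons] at h
    obtain ⟨hk, hrest⟩ := h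
    rw [show PySem.Dict.mk (kv :: rest) = PySem.Dict.mk ((kv.1, kv.2) :: rest) from rfl]
    rw [PySem.Dict.get?_mk_cons, List.any_cons]
    have hrestfalse : kv.1 = m →
        rest.any (fun p => p.1 == m && p.2 != "") = false := by
      intro he
      rw [List.any_eq_false]
      intro p hp
      simp only [Bool.and_eq_true, beq_iff_eq, not_and]
      intro hpe
      exact absurd ((hpe.trans he.symm) ▸ (List.mem_map_of_mem hp : p.1 ∈ rest.map Prod.fst)) hk
    by_cases he : kv.1 = m
    · rw [hrestfalse he, Bool.or_false]
      simp only [he, beq_self_eq_true, if_true, Bool.true_and]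
      apply Bool.eq_iff_iff.mpr
      simp [bne]
    · have : (kv.1 == m) = false := by simp [he]
      rw [this, if_neg (by simp), ih hrest]
      simp

-- any over a list with pointwise-equal predicates
theorem pvAnyCongr {α : Type} {p q : α → Bool} (l : List α)
    (h : ∀ x ∈ l, p x = q x) : l.any p = l.any q := by
  induction l with
  | nil => rfl
  | cons a t ih =>
    simp only [List.any_cons]
    rw [h a (List.mem_cons_self ..), ih (fun x hx => h x (List.mem_cons_of_mem a hx))]

-- membership in a set after one add
theorem pvContains_add {α : Type} [BEq α] [LawfulBEq α] (s : PySem.Set α) (x y : α) :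
    PySem.Set.contains (PySem.Set.add s x) y = (PySem.Set.contains s y || x == y) := by
  simp only [PySem.Set.contains_eq_listContains]
  apply Bool.eq_iff_iff.mpr
  simp [PySem.Set.mem_add s x y]
  constructor
  · rintro (h | h)
    · exact Or.inl h
    · exact Or.inr h.symm
  · rintro (h | h)
    · exact Or.inl h
    · exact Or.inr h.symm

-- membership in the index after folding one row
theorem pvRowFold_contains (row : List (String × String)) (s : PySem.Set String) (m : String) :
    PySem.Set.contains
      (row.foldl (fun s kv => if kv.2 ≠ "" then PySem.Set.add s kv.1 else s) s) m
    = (PySem.Set.contains s m || row.any (fun kv => kv.1 == m && kv.2 != "")) := by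
  induction row generalizing s with
  | nil => simp
  | cons kv rest ih =>
    simp only [List.foldl_cons, List.any_cons]
    rw [ih]
    by_cases hv : kv.2 = ""
    · simp [hv]
    · rw [if_pos hv, pvContains_add]
      have hb : (kv.2 != "") = true := by simp [bne, hv]
      rw [hb, Bool.and_true, Bool.or_assoc, Bool.or_comm (kv.1 == m)]

-- membership in B's index over all rows = A's inner any
theorem pvPresentKeys_contains (rows : List (List (String × String))) (m : String) :
    PySem.Set.contains (pvPresentKeys rows) m
    = rows.any (fun row => row.any (fun kv => kv.1 == m && kv.2 != "")) := by
  unfold pvPresentKeys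
  have hgen : ∀ (l : List (List (String × String))) (s : PySem.Set String),
      PySem.Set.contains
        (l.foldl (fun s row =>
          row.foldl (fun s kv => if kv.2 ≠ "" then PySem.Set.add s kv.1 else s) s) s) m
      = (PySem.Set.contains s m ||
         l.any (fun row => row.any (fun kv => kv.1 == m && kv.2 != ""))) := by
    intro l
    induction l with
    | nil => simp
    | cons row rest ih =>
      intro s
      simp only [List.foldl_cons, List.any_cons]
      rw [ih, pvRowFold_contains, Bool.or_assoc]
  rw [hgen]
  simp [PySem.Set.empty, PySem.Set.contains_eq_listContains]

-- ===== VERDICT (by name: the statement is the Claim_ definition above) =====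
theorem choose_metrics_spec : Claim_equal_choose_metrics := by
  intro rows metric_set metrics_override _ hpre
  unfold Spec_choose_metrics
  simp only [choose_metrics, choose_metrics_alt]
  rw [PySem.List.foldl_append_if_eq_filter, List.nil_append, ← pvOverride_eq]
  apply List.filter_congr
  intro m _
  rw [pvPresentKeys_contains]
  exact pvAnyCongr rows (fun row hr => pvRow_eq row m (hpre row hr))
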